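-- pv_equiv track=rewrite | github.com/rhyan-jackson/leci-ua | 1.1/FPP/aula08/interests.py | common_interests
-- ===== SOURCE A (Python) =====
-- def common_interests(interests_dict):
--     common_interests_dict = dict()
--     for name1, interests1 in interests_dict.items():
--         for name2, interests2 in interests_dict.items():
--             if name1 < name2:
--                 intersection = interests1.intersection(interests2)
--                 if len(intersection) != 0:
--                     common_interests_dict[(name1, name2)] = intersection
--     return common_interests_dict
-- ===== SOURCE B (Python) =====
-- def common_interests(interests_dict):
--     # Inverted index interest -> owners seen so far; only co-occurring pairs become
--     # candidates, then candidates are emitted in A's deterministic key order.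
--     items = list(interests_dict.items())
--     n = len(items)
--     pos = {}
--     for i, (name, _ints) in enumerate(items):
--         pos[name] = i
--     owners = {}
--     cand = set()
--     for name, ints in items:
--         for t in ints:
--             for other in owners.get(t, []):
--                 if other != name:
--                     cand.add((other, name) if other < name else (name, other))
--             owners.setdefault(t, []).append(name)
--     result = {}
--     for a, b in sorted(cand, key=lambda p: pos[p[0]] * n + pos[p[1]]):
--         result[(a, b)] = interests_dict[a] & interests_dict[b]
--     return result
-- ===== Notes on version B (the rewrite author's own statement) =====
-- stated objective: faster
-- what changed: B replaces A's all-pairs double scan with set intersections by an inverted index interest->owners that collects only co-occurring name pairs, then emits them in A's key order via a sort by position.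
import Mathlib
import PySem

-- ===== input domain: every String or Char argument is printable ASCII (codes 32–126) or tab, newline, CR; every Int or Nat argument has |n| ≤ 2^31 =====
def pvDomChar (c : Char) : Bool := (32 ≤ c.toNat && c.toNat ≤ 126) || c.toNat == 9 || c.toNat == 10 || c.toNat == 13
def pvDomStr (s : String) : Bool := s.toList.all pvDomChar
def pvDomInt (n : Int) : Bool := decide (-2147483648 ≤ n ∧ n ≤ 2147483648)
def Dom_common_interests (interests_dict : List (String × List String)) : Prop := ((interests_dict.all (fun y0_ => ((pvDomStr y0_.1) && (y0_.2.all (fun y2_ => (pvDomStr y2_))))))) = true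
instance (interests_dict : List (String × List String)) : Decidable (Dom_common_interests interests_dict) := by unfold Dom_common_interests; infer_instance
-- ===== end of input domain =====

-- B replaces A's all-pairs double scan by an inverted index interest → earlier owners:
-- only pairs that actually co-occur under some interest become candidates, which are then
-- emitted in A's deterministic key order. Equivalence of the RETURN value is proved below.

-- ===== PORT A =====
def common_interests (interests_dict : List (String × List String)) : List (String × String × List String) :=
  ((interests_dict.foldl (fun acc p1 =>
      interests_dict.foldl (fun acc2 p2 =>
        if p1.1 < p2.1 then
          let intersection := PySem.Set.inter p1.2 p2.2
          if intersection.length ≠ 0 then acc2.insert (p1.1, p2.1) intersection else acc2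
        else acc2) acc)
    (PySem.Dict.empty : PySem.Dict (String × String) (List String))).items).map
    (fun q => (q.1.1, q.1.2, q.2))

-- ===== PORT B =====
def common_interests_alt (interests_dict : List (String × List String)) : List (String × String × List String) :=
  let items := interests_dict
  let n : Int := (items.length : Int)
  let pos : PySem.Dict String Int :=
    (PySem.List.enumerate items 0).foldl (fun pd ip => pd.insert ip.2.1 ip.1) PySem.Dict.empty
  let st := items.foldl
    (fun (st : PySem.Dict String (List String) × PySem.Set (String × String)) p =>
      p.2.foldl (fun st t =>
        let cand := (st.1.getD t []).foldl (fun c other =>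
            if other ≠ p.1 then
              PySem.Set.add c (if other < p.1 then (other, p.1) else (p.1, other))
            else c) st.2
        (st.1.modify t [] (fun l => l ++ [p.1]), cand)) st)
    ((PySem.Dict.empty : PySem.Dict String (List String)),
     (PySem.Set.empty : PySem.Set (String × String)))
  let dd := PySem.Dict.mk interests_dict
  -- interests_dict[a] lookups: the keys are always present (they come from the dict),
  -- so the total getD never returns its default
  ((PySem.List.sorted st.2 (fun pr => pos.getD pr.1 0 * n + pos.getD pr.2 0) false).foldl
      (fun acc pr => acc.insert pr (PySem.Set.inter (dd.getD pr.1 []) (dd.getD pr.2 [])))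
      (PySem.Dict.empty : PySem.Dict (String × String) (List String))).items.map
    (fun q => (q.1.1, q.1.2, q.2))

-- ===== PRECONDITION & SPEC =====
-- The argument stands for a Python dict mapping names to SETS of interests, so Pre_ only
-- states that shape: keys are distinct (a dict cannot repeat a key) and each value list is
-- duplicate-free (it holds the distinct elements of a set). No actual Python input is excluded.
def Pre_common_interests (interests_dict : List (String × List String)) : Prop :=
  (interests_dict.map (·.1)).Nodup ∧ ∀ p ∈ interests_dict, p.2.Nodup
instance (interests_dict : List (String × List String)) : Decidable (Pre_common_interests interests_dict) := by unfold Pre_common_interests; infer_instance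

def pvWitness_common_interests : (List (String × List String)) :=
  [("ana", ["chess", "films"]), ("bob", ["films"]), ("cid", ["golf"])]

def Spec_common_interests (interests_dict : List (String × List String)) (out : List (String × String × List String)) : Prop := out = common_interests_alt interests_dict
instance (interests_dict : List (String × List String)) (out : List (String × String × List String)) : Decidable (Spec_common_interests interests_dict out) := by unfold Spec_common_interests; infer_instance

-- ===== CLAIM (what is proved, stated in full; the proofs are below) =====
def Claim_equal_common_interests : Prop := ∀ (interests_dict : List (String × List String)), Dom_common_interests interests_dict → Pre_common_interests interests_dict → Spec_common_interests interests_dict (common_interests interests_dict)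

-- ===== LEMMAS AND PROOFS =====

-- the ordered name pair B inserts into the candidate set
def ciOp (o nm : String) : String × String := if o < nm then (o, nm) else (nm, o)

-- the (p1, p2) pairs A's double loop inserts, in A's iteration order
def ciPairs (d : List (String × List String)) :
    List ((String × List String) × (String × List String)) :=
  d.flatMap (fun p1 =>
    (d.filter (fun p2 =>
      decide (p1.1 < p2.1 ∧ (PySem.Set.inter p1.2 p2.2).length ≠ 0))).map (fun p2 => (p1, p2)))

-- B's position dictionary and sort key
def ciPos (d : List (String × List String)) : PySem.Dict String Int :=
  (PySem.List.enumerate d 0).foldl (fun pd ip => pd.insert ip.2.1 ip.1) PySem.Dict.empty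

def ciKey (d : List (String × List String)) (pr : String × String) : Int :=
  (ciPos d).getD pr.1 0 * (d.length : Int) + (ciPos d).getD pr.2 0

-- B's inner loop body (identical, step for step, to the lambda in the port)
def ciInnerStep (p : String × List String)
    (st : PySem.Dict String (List String) × PySem.Set (String × String)) (t : String) :
    PySem.Dict String (List String) × PySem.Set (String × String) :=
  let cand := (st.1.getD t []).foldl (fun c other =>
      if other ≠ p.1 then
        PySem.Set.add c (if other < p.1 then (other, p.1) else (p.1, other))
      else c) st.2
  (st.1.modify t [] (fun l => l ++ [p.1]), cand)


-- ---------- generic facts about B's position dictionary ----------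

theorem ciPosAux_not_mem (l : List (String × List String)) (s : Int)
    (pd : PySem.Dict String Int) (x : String) (hx : x ∉ l.map (·.1)) :
    ((PySem.List.enumerate l s).foldl (fun pd ip => pd.insert ip.2.1 ip.1) pd).getD x 0
      = pd.getD x 0 := by
  induction l generalizing s pd with
  | nil => simp [PySem.List.enumerate]
  | cons p rest ih =>
    simp only [List.map_cons, List.mem_cons, not_or] at hx
    rw [PySem.List.enumerate_cons, List.foldl_cons, ih _ _ hx.2,
      PySem.Dict.getD_insert, if_neg hx.1]

theorem ciPosAux_getElem (l : List (String × List String)) (s : Int)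
    (pd : PySem.Dict String Int) (hnd : (l.map (·.1)).Nodup)
    (i : Nat) (hi : i < l.length) :
    ((PySem.List.enumerate l s).foldl (fun pd ip => pd.insert ip.2.1 ip.1) pd).getD (l[i].1) 0
      = s + i := by
  induction l generalizing s pd i with
  | nil => simp at hi
  | cons p rest ih =>
    simp only [List.map_cons, List.nodup_cons] at hnd
    rw [PySem.List.enumerate_cons, List.foldl_cons]
    match i with
    | 0 =>
      simp only [List.getElem_cons_zero]
      rw [ciPosAux_not_mem _ _ _ _ hnd.1, PySem.Dict.getD_insert, if_pos rfl]
      simp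
    | Nat.succ j =>
      simp only [List.getElem_cons_succ]
      rw [ih _ _ hnd.2 j (by simpa using hi)]
      push_cast
      ring

theorem ciPos_getElem (d : List (String × List String)) (hnd : (d.map (·.1)).Nodup)
    (i : Nat) (hi : i < d.length) : (ciPos d).getD (d[i].1) 0 = i := by
  unfold ciPos
  rw [ciPosAux_getElem d 0 _ hnd i hi]
  simp

theorem ciPos_bounds (d : List (String × List String)) (hnd : (d.map (·.1)).Nodup)
    (p : String × List String) (hp : p ∈ d) :
    0 ≤ (ciPos d).getD p.1 0 ∧ (ciPos d).getD p.1 0 < (d.length : Int) := by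
  obtain ⟨i, hi, rfl⟩ := List.mem_iff_getElem.mp hp
  rw [ciPos_getElem d hnd i hi]
  constructor
  · positivity
  · exact_mod_cast hi

theorem ciPos_pairwise (d : List (String × List String)) (hnd : (d.map (·.1)).Nodup) :
    d.Pairwise (fun p q => (ciPos d).getD p.1 0 < (ciPos d).getD q.1 0) := by
  rw [List.pairwise_iff_getElem]
  intro i j hi hj hij
  rw [ciPos_getElem d hnd i hi, ciPos_getElem d hnd j hj]
  exact_mod_cast hij

-- ---------- A's double loop produces exactly ciPairs, in order ----------

theorem ciPairs_mem (d : List (String × List String))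
    (q : (String × List String) × (String × List String)) :
    q ∈ ciPairs d ↔ q.1 ∈ d ∧ q.2 ∈ d ∧ q.1.1 < q.2.1 ∧
      (PySem.Set.inter q.1.2 q.2.2).length ≠ 0 := by
  unfold ciPairs
  simp only [List.mem_flatMap, List.mem_map, List.mem_filter, decide_eq_true_eq]
  constructor
  · rintro ⟨p1, h1, p2, ⟨h2, hlt, hne⟩, rfl⟩
    exact ⟨h1, h2, hlt, hne⟩
  · rintro ⟨h1, h2, hlt, hne⟩
    exact ⟨q.1, h1, q.2, ⟨h2, hlt, hne⟩, Prod.mk.eta⟩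

theorem ciKeys_nodup (d : List (String × List String)) (hnd : (d.map (·.1)).Nodup) :
    ((ciPairs d).map (fun q => (q.1.1, q.2.1))).Nodup := by
  have hd : d.Nodup := hnd.of_map _
  have hpw : d.Pairwise (fun p q => p.1 ≠ q.1) := List.pairwise_map.mp hnd
  unfold ciPairs
  rw [List.map_flatMap, List.nodup_flatMap]
  constructor
  · intro p1 hp1
    rw [List.map_map]
    rw [show ((fun (q : (String × List String) × (String × List String)) => (q.1.1, q.2.1))
        ∘ (fun (p2 : String × List String) => (p1, p2)))
      = ((fun s => (p1.1, s)) ∘ (fun (p2 : String × List String) => p2.1)) from rfl]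
    rw [← List.map_map]
    have hfsub : ((d.filter (fun p2 =>
        decide (p1.1 < p2.1 ∧ (PySem.Set.inter p1.2 p2.2).length ≠ 0))).map (·.1)).Nodup :=
      hnd.sublist (List.Sublist.map _ List.filter_sublist)
    exact hfsub.map (fun a b h => by simpa using congrArg Prod.snd h)
  · refine hpw.imp ?_
    intro p1 p1' hne a ha hb
    simp only [List.mem_map] at ha hb
    obtain ⟨q, ⟨p2, hp2, rfl⟩, rfl⟩ := ha
    obtain ⟨q', ⟨p2', hp2', rfl⟩, hEq⟩ := hb
    exact hne (congrArg Prod.fst hEq).symm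
theorem ciA_eq (d : List (String × List String)) (hnd : (d.map (·.1)).Nodup) :
    common_interests d =
      (ciPairs d).map (fun q => (q.1.1, q.2.1, PySem.Set.inter q.1.2 q.2.2)) := by
  unfold common_interests
  have hF : (fun (acc : PySem.Dict (String × String) (List String)) (p1 : String × List String) =>
      d.foldl (fun acc2 (p2 : String × List String) =>
        if p1.1 < p2.1 then
          let intersection := PySem.Set.inter p1.2 p2.2
          if intersection.length ≠ 0 then acc2.insert (p1.1, p2.1) intersection else acc2
        else acc2) acc)
      = (fun acc p1 => List.foldl
          (fun (acc2 : PySem.Dict (String × String) (List String)) q =>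
            acc2.insert (q.1.1, q.2.1) (PySem.Set.inter q.1.2 q.2.2)) acc
          ((d.filter (fun p2 =>
            decide (p1.1 < p2.1 ∧ (PySem.Set.inter p1.2 p2.2).length ≠ 0))).map
            (fun p2 => (p1, p2)))) := by
    funext acc p1
    rw [show (fun (acc2 : PySem.Dict (String × String) (List String)) (p2 : String × List String) =>
        if p1.1 < p2.1 then
          let intersection := PySem.Set.inter p1.2 p2.2
          if intersection.length ≠ 0 then acc2.insert (p1.1, p2.1) intersection else acc2
        else acc2)
      = (fun (acc2 : PySem.Dict (String × String) (List String)) (p2 : String × List String) =>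
        if p1.1 < p2.1 ∧ (PySem.Set.inter p1.2 p2.2).length ≠ 0 then
          acc2.insert (p1.1, p2.1) (PySem.Set.inter p1.2 p2.2) else acc2) from by
      funext acc2 p2
      by_cases h1 : p1.1 < p2.1 <;> by_cases h2 : (PySem.Set.inter p1.2 p2.2).length ≠ 0 <;>
        simp [h1, h2]]
    rw [PySem.List.foldl_ite_eq_foldl_filter
      (fun p2 => p1.1 < p2.1 ∧ (PySem.Set.inter p1.2 p2.2).length ≠ 0)
      (fun (acc2 : PySem.Dict (String × String) (List String)) p2 =>
        acc2.insert (p1.1, p2.1) (PySem.Set.inter p1.2 p2.2)) d acc]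
    conv_rhs => rw [List.foldl_map]
  rw [hF, ← List.foldl_flatMap]
  have hitems : (List.foldl
      (fun (acc2 : PySem.Dict (String × String) (List String)) q =>
        acc2.insert (q.1.1, q.2.1) (PySem.Set.inter q.1.2 q.2.2))
      PySem.Dict.empty (ciPairs d)).items
      = [] ++ (ciPairs d).map (fun q => ((q.1.1, q.2.1), PySem.Set.inter q.1.2 q.2.2)) :=
    PySem.Dict.items_foldl_insert_fresh (ciPairs d) (fun q => (q.1.1, q.2.1))
      (fun q => PySem.Set.inter q.1.2 q.2.2) PySem.Dict.empty
      (fun a _ => PySem.Dict.contains_empty _) (ciKeys_nodup d hnd)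
  rw [show (d.flatMap (fun p1 => (d.filter (fun p2 =>
      decide (p1.1 < p2.1 ∧ (PySem.Set.inter p1.2 p2.2).length ≠ 0))).map
      (fun p2 => (p1, p2)))) = ciPairs d from rfl]
  rw [hitems]
  simp only [List.nil_append, List.map_map]
  rfl

-- ---------- B's candidate set: membership and Nodup ----------

theorem ciAddLoop_mem (nm : String) (os : List String) (c : PySem.Set (String × String))
    (x : String × String) :
    x ∈ os.foldl (fun c other =>
        if other ≠ nm then
          PySem.Set.add c (if other < nm then (other, nm) else (nm, other))
        else c) c ↔ x ∈ c ∨ ∃ o ∈ os, o ≠ nm ∧ x = ciOp o nm := by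
  induction os generalizing c with
  | nil => simp
  | cons o rest ih =>
    simp only [List.foldl_cons, List.mem_cons]
    by_cases h : o = nm
    · rw [if_neg (by simpa using h), ih]
      constructor
      · rintro (hc | ⟨o', ho', hne, hx⟩)
        · exact Or.inl hc
        · exact Or.inr ⟨o', Or.inr ho', hne, hx⟩
      · rintro (hc | ⟨o', (rfl | ho'), hne, hx⟩)
        · exact Or.inl hc
        · exact absurd h hne
        · exact Or.inr ⟨o', ho', hne, hx⟩
    · rw [if_pos (by simpa using h), ih]
      simp only [PySem.Set.mem_add]
      constructor
      · rintro ((hc | hx) | ⟨o', ho', hne, hx⟩)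
        · exact Or.inl hc
        · exact Or.inr ⟨o, Or.inl rfl, h, by simpa [ciOp] using hx⟩
        · exact Or.inr ⟨o', Or.inr ho', hne, hx⟩
      · rintro (hc | ⟨o', (rfl | ho'), hne, hx⟩)
        · exact Or.inl (Or.inl hc)
        · exact Or.inl (Or.inr (by simpa [ciOp] using hx))
        · exact Or.inr ⟨o', ho', hne, hx⟩

theorem ciAddLoop_nodup (nm : String) (os : List String) (c : PySem.Set (String × String))
    (hc : c.Nodup) :
    (os.foldl (fun c other =>
        if other ≠ nm then
          PySem.Set.add c (if other < nm then (other, nm) else (nm, other))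
        else c) c).Nodup := by
  induction os generalizing c with
  | nil => exact hc
  | cons o rest ih =>
    simp only [List.foldl_cons]
    by_cases h : o ≠ nm
    · rw [if_pos h]
      exact ih _ (PySem.Set.nodup_add _ _ hc)
    · rw [if_neg h]
      exact ih _ hc

theorem ciInner_owners (p : String × List String) (l : List String)
    (ow : PySem.Dict String (List String)) (c : PySem.Set (String × String))
    (hl : l.Nodup) (s : String) :
    ((l.foldl (ciInnerStep p) (ow, c)).1).getD s []
      = ow.getD s [] ++ (if s ∈ l then [p.1] else []) := by
  induction l generalizing ow c with
  | nil => simp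
  | cons t rest ih =>
    simp only [List.nodup_cons] at hl
    simp only [List.foldl_cons, List.mem_cons]
    rw [show ciInnerStep p (ow, c) t = ((ow.modify t [] (fun l => l ++ [p.1])),
      (ciInnerStep p (ow, c) t).2) from rfl]
    rw [ih _ _ hl.2, PySem.Dict.getD_modify]
    by_cases hs : s = t
    · subst hs
      rw [if_pos rfl, if_neg (by simpa using hl.1), if_pos (Or.inl rfl)]
      simp
    · rw [if_neg hs]
      by_cases hr : s ∈ rest
      · rw [if_pos hr, if_pos (Or.inr hr)]
      · rw [if_neg hr, if_neg (by simp [hs, hr])]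

theorem ciInner_cand (p : String × List String) (l : List String)
    (ow : PySem.Dict String (List String)) (c : PySem.Set (String × String))
    (hl : l.Nodup) (x : String × String) :
    x ∈ (l.foldl (ciInnerStep p) (ow, c)).2 ↔
      x ∈ c ∨ ∃ t ∈ l, ∃ o ∈ ow.getD t [], o ≠ p.1 ∧ x = ciOp o p.1 := by
  induction l generalizing ow c with
  | nil => simp
  | cons t rest ih =>
    simp only [List.nodup_cons] at hl
    simp only [List.foldl_cons, List.mem_cons]
    rw [show ciInnerStep p (ow, c) t = ((ow.modify t [] (fun l => l ++ [p.1])),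
      (ow.getD t []).foldl (fun c other =>
        if other ≠ p.1 then
          PySem.Set.add c (if other < p.1 then (other, p.1) else (p.1, other))
        else c) c) from rfl]
    rw [ih _ _ hl.2]
    rw [ciAddLoop_mem]
    constructor
    · rintro ((hc | ⟨o, ho, hne, hx⟩) | ⟨t', ht', o, ho, hne, hx⟩)
      · exact Or.inl hc
      · exact Or.inr ⟨t, Or.inl rfl, o, ho, hne, hx⟩
      · refine Or.inr ⟨t', Or.inr ht', o, ?_, hne, hx⟩
        rwa [PySem.Dict.getD_modify, if_neg (by rintro rfl; exact hl.1 ht')] at ho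
    · rintro (hc | ⟨t', (rfl | ht'), o, ho, hne, hx⟩)
      · exact Or.inl (Or.inl hc)
      · exact Or.inl (Or.inr ⟨o, ho, hne, hx⟩)
      · refine Or.inr ⟨t', ht', o, ?_, hne, hx⟩
        rwa [PySem.Dict.getD_modify, if_neg (by rintro rfl; exact hl.1 ht')]

theorem ciInner_nodup (p : String × List String) (l : List String)
    (ow : PySem.Dict String (List String)) (c : PySem.Set (String × String))
    (hc : c.Nodup) : ((l.foldl (ciInnerStep p) (ow, c)).2).Nodup := by
  induction l generalizing ow c with
  | nil => exact hc
  | cons t rest ih =>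
    simp only [List.foldl_cons]
    exact ih _ _ (ciAddLoop_nodup _ _ _ hc)

theorem ciOp_comm (a b : String) (h : a ≠ b) : ciOp a b = ciOp b a := by
  unfold ciOp
  rcases lt_trichotomy a b with hlt | heq | hgt
  · rw [if_pos hlt, if_neg (not_lt.mpr hlt.le)]
  · exact absurd heq h
  · rw [if_neg (not_lt.mpr hgt.le), if_pos hgt]

theorem ciOuter_cand (l h : List (String × List String))
    (ow : PySem.Dict String (List String)) (c : PySem.Set (String × String))
    (how : ∀ t, ow.getD t [] = (h.filter (fun p => decide (t ∈ p.2))).map (·.1))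
    (hv : ∀ p ∈ l, p.2.Nodup) (x : String × String) :
    x ∈ (l.foldl (fun st p => p.2.foldl (ciInnerStep p) st) (ow, c)).2 ↔
      x ∈ c ∨ ∃ p ∈ l, ∃ q ∈ h ++ l, p.1 ≠ q.1 ∧ (∃ t, t ∈ p.2 ∧ t ∈ q.2)
        ∧ x = ciOp q.1 p.1 := by
  induction l generalizing h ow c with
  | nil => simp
  | cons e rest ih =>
    simp only [List.foldl_cons]
    rw [show e.2.foldl (ciInnerStep e) (ow, c) = ((e.2.foldl (ciInnerStep e) (ow, c)).1,
      (e.2.foldl (ciInnerStep e) (ow, c)).2) from rfl]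
    have hve : e.2.Nodup := hv e List.mem_cons_self
    have how' : ∀ t, ((e.2.foldl (ciInnerStep e) (ow, c)).1).getD t []
        = ((h ++ [e]).filter (fun p => decide (t ∈ p.2))).map (·.1) := by
      intro t
      rw [ciInner_owners e e.2 ow c hve t, how t, List.filter_append, List.map_append]
      congr 1
      by_cases ht : t ∈ e.2 <;> simp [ht]
    rw [ih (h ++ [e]) _ _ how' (fun p hp => hv p (List.mem_cons_of_mem _ hp))]
    rw [ciInner_cand e e.2 ow c hve x]
    constructor
    · rintro ((hc | ⟨t, ht, o, ho, hne, hx⟩) | ⟨p, hp, q, hq, hne, hsh, hx⟩)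
      · exact Or.inl hc
      · rw [how t] at ho
        simp only [List.mem_map, List.mem_filter, decide_eq_true_eq] at ho
        obtain ⟨q, ⟨hqh, htq⟩, rfl⟩ := ho
        exact Or.inr ⟨e, List.mem_cons_self, q, List.mem_append_left _ hqh,
          fun hh => hne hh.symm, ⟨t, ht, htq⟩, hx⟩
      · refine Or.inr ⟨p, List.mem_cons_of_mem _ hp, q, ?_, hne, hsh, hx⟩
        rw [List.append_assoc] at hq
        simpa using hq
    · rintro (hc | ⟨p, hp, q, hq, hne, hsh, hx⟩)
      · exact Or.inl (Or.inl hc)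
      · rcases List.mem_cons.mp hp with rfl | hpr
        · rcases List.mem_append.mp hq with hqh | hqer
          · refine Or.inl (Or.inr ?_)
            obtain ⟨t, ht1, ht2⟩ := hsh
            refine ⟨t, ht1, q.1, ?_, fun hh => hne hh.symm, hx⟩
            rw [how t]
            simp only [List.mem_map, List.mem_filter, decide_eq_true_eq]
            exact ⟨q, ⟨hqh, ht2⟩, rfl⟩
          · rcases List.mem_cons.mp hqer with rfl | hqr
            · exact absurd rfl hne
            · obtain ⟨t, ht1, ht2⟩ := hsh
              refine Or.inr ⟨q, hqr, p, ?_, fun hh => hne hh.symm, ⟨t, ht2, ht1⟩, ?_⟩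
              · exact List.mem_append_left _ (List.mem_append_right _ List.mem_cons_self)
              · rw [hx]
                exact ciOp_comm q.1 p.1 (fun hh => hne hh.symm)
        · refine Or.inr ⟨p, hpr, q, ?_, hne, hsh, hx⟩
          rw [List.append_assoc]
          simpa using hq

theorem ciOuter_nodup (l : List (String × List String))
    (ow : PySem.Dict String (List String)) (c : PySem.Set (String × String))
    (hc : c.Nodup) :
    ((l.foldl (fun st p => p.2.foldl (ciInnerStep p) st) (ow, c)).2).Nodup := by
  induction l generalizing ow c with
  | nil => exact hc
  | cons e rest ih =>
    simp only [List.foldl_cons]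
    rw [show e.2.foldl (ciInnerStep e) (ow, c) = ((e.2.foldl (ciInnerStep e) (ow, c)).1,
      (e.2.foldl (ciInnerStep e) (ow, c)).2) from rfl]
    exact ih _ _ (ciInner_nodup e e.2 ow c hc)

-- the final candidate set of B's scan over d
def ciCand (d : List (String × List String)) : PySem.Set (String × String) :=
  (d.foldl (fun st p => p.2.foldl (ciInnerStep p) st)
    ((PySem.Dict.empty : PySem.Dict String (List String)),
     (PySem.Set.empty : PySem.Set (String × String)))).2

theorem ciCand_mem (d : List (String × List String)) (hv : ∀ p ∈ d, p.2.Nodup)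
    (x : String × String) :
    x ∈ ciCand d ↔ ∃ p ∈ d, ∃ q ∈ d, p.1 ≠ q.1 ∧ (∃ t, t ∈ p.2 ∧ t ∈ q.2)
      ∧ x = ciOp q.1 p.1 := by
  unfold ciCand
  rw [ciOuter_cand d [] _ _ (fun t => by simp [PySem.Dict.getD_empty]) hv x]
  simp [PySem.Set.empty]

-- ---------- the sorted candidate list IS A's key list ----------

theorem ciLp_pairwise (d : List (String × List String)) (hnd : (d.map (·.1)).Nodup) :
    ((ciPairs d).map (fun q => (q.1.1, q.2.1))).Pairwise
      (fun a b => ciKey d a < ciKey d b) := by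
  unfold ciPairs
  rw [List.map_flatMap, List.pairwise_flatMap]
  constructor
  · intro p1 hp1
    rw [List.map_map]
    have hsub : (d.filter (fun p2 =>
        decide (p1.1 < p2.1 ∧ (PySem.Set.inter p1.2 p2.2).length ≠ 0))).Pairwise
        (fun p q => (ciPos d).getD p.1 0 < (ciPos d).getD q.1 0) :=
      (ciPos_pairwise d hnd).sublist List.filter_sublist
    refine List.Pairwise.map _ ?_ hsub
    intro a b hab
    show (ciPos d).getD p1.1 0 * (d.length : Int) + (ciPos d).getD a.1 0
      < (ciPos d).getD p1.1 0 * (d.length : Int) + (ciPos d).getD b.1 0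
    linarith [hab]
  · have hp2 : d.Pairwise (fun p q => p ∈ d ∧ q ∈ d ∧
        (ciPos d).getD p.1 0 < (ciPos d).getD q.1 0) := by
      rw [List.pairwise_iff_getElem]
      intro i j hi hj hij
      exact ⟨List.getElem_mem hi, List.getElem_mem hj, by
        rw [ciPos_getElem d hnd i hi, ciPos_getElem d hnd j hj]; exact_mod_cast hij⟩
    refine hp2.imp ?_
    intro p1 p1' h
    obtain ⟨h1, h1', hlt⟩ := h
    intro a ha b hb
    simp only [List.mem_map] at ha hb
    obtain ⟨q, ⟨p2, hp2m, rfl⟩, rfl⟩ := ha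
    obtain ⟨q', ⟨p2', hp2m', rfl⟩, rfl⟩ := hb
    have ha2d : p2 ∈ d := (List.mem_filter.mp hp2m).1
    have hb2d : p2' ∈ d := (List.mem_filter.mp hp2m').1
    have bnd1 := ciPos_bounds d hnd p2 ha2d
    have bnd2 := ciPos_bounds d hnd p2' hb2d
    show (ciPos d).getD p1.1 0 * (d.length : Int) + (ciPos d).getD p2.1 0
      < (ciPos d).getD p1'.1 0 * (d.length : Int) + (ciPos d).getD p2'.1 0
    have hstep : (ciPos d).getD p1.1 0 + 1 ≤ (ciPos d).getD p1'.1 0 :=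
      Int.lt_iff_add_one_le.mp hlt
    have hn : (0 : Int) ≤ (d.length : Int) := by positivity
    nlinarith [bnd1.1, bnd1.2, bnd2.1, bnd2.2, hstep, hn]
theorem ciSorted_eq (d : List (String × List String)) (hnd : (d.map (·.1)).Nodup)
    (hv : ∀ p ∈ d, p.2.Nodup) :
    PySem.List.sorted (ciCand d) (ciKey d) false
      = (ciPairs d).map (fun q => (q.1.1, q.2.1)) := by
  have hbr : ∀ s t : List String, (PySem.Set.inter s t).length ≠ 0 ↔ ∃ y, y ∈ s ∧ y ∈ t := by
    intro s t
    rw [Ne, List.length_eq_zero_iff]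
    constructor
    · intro hne
      obtain ⟨y, hy⟩ := List.exists_mem_of_ne_nil _ hne
      exact ⟨y, (PySem.Set.mem_inter s t y).mp hy⟩
    · rintro ⟨y, h1, h2⟩ hnil
      have := (PySem.Set.mem_inter s t y).mpr ⟨h1, h2⟩
      rw [hnil] at this
      simp at this
  apply PySem.List.sorted_eq_of_perm_of_pairwise_lt
  · rw [List.perm_ext_iff_of_nodup (ciKeys_nodup d hnd)
      (show (ciCand d).Nodup from
        ciOuter_nodup d PySem.Dict.empty PySem.Set.empty List.nodup_nil)]
    intro a
    constructor
    · intro ha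
      rw [List.mem_map] at ha
      obtain ⟨q, hq, rfl⟩ := ha
      rw [ciPairs_mem] at hq
      obtain ⟨h1, h2, hlt, hne⟩ := hq
      show (q.1.1, q.2.1) ∈ ciCand d
      rw [ciCand_mem d hv]
      obtain ⟨t, ht1, ht2⟩ := (hbr q.1.2 q.2.2).mp hne
      refine ⟨q.2, h2, q.1, h1, fun hh => (ne_of_lt hlt) hh.symm, ⟨t, ht2, ht1⟩, ?_⟩
      unfold ciOp
      rw [if_pos hlt]
    · intro ha
      have ha' : a ∈ ciCand d := ha
      rw [ciCand_mem d hv] at ha'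
      obtain ⟨p, hp, q, hq, hne, ⟨t, ht1, ht2⟩, rfl⟩ := ha'
      rw [List.mem_map]
      rcases lt_trichotomy q.1 p.1 with hqp | hqp | hqp
      · refine ⟨(q, p), ?_, ?_⟩
        · rw [ciPairs_mem]
          exact ⟨hq, hp, hqp, (hbr q.2 p.2).mpr ⟨t, ht2, ht1⟩⟩
        · show (q.1, p.1) = ciOp q.1 p.1
          unfold ciOp
          rw [if_pos hqp]
      · exact absurd hqp.symm hne
      · refine ⟨(p, q), ?_, ?_⟩
        · rw [ciPairs_mem]
          exact ⟨hp, hq, hqp, (hbr p.2 q.2).mpr ⟨t, ht1, ht2⟩⟩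
        · show (p.1, q.1) = ciOp q.1 p.1
          unfold ciOp
          rw [if_neg (not_lt.mpr hqp.le)]
  · exact ciLp_pairwise d hnd
theorem ciB_eq (d : List (String × List String)) (hnd : (d.map (·.1)).Nodup)
    (hv : ∀ p ∈ d, p.2.Nodup) :
    common_interests_alt d =
      (ciPairs d).map (fun q => (q.1.1, q.2.1,
        PySem.Set.inter ((PySem.Dict.mk d).getD q.1.1 []) ((PySem.Dict.mk d).getD q.2.1 []))) := by
  have h0 : common_interests_alt d =
      ((PySem.List.sorted (ciCand d) (ciKey d) false).foldl
        (fun acc pr => acc.insert pr (PySem.Set.inter ((PySem.Dict.mk d).getD pr.1 [])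
          ((PySem.Dict.mk d).getD pr.2 [])))
        (PySem.Dict.empty : PySem.Dict (String × String) (List String))).items.map
      (fun q => (q.1.1, q.1.2, q.2)) := rfl
  rw [h0, ciSorted_eq d hnd hv]
  have hnd' : (((ciPairs d).map (fun q => (q.1.1, q.2.1))).map
      (fun (pr : String × String) => pr)).Nodup := by
    simpa using ciKeys_nodup d hnd
  have hitems : (((ciPairs d).map (fun q => (q.1.1, q.2.1))).foldl
      (fun (acc : PySem.Dict (String × String) (List String)) pr =>
        acc.insert pr (PySem.Set.inter ((PySem.Dict.mk d).getD pr.1 [])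
          ((PySem.Dict.mk d).getD pr.2 [])))
      PySem.Dict.empty).items
      = [] ++ ((ciPairs d).map (fun q => (q.1.1, q.2.1))).map
          (fun pr => (pr, PySem.Set.inter ((PySem.Dict.mk d).getD pr.1 [])
            ((PySem.Dict.mk d).getD pr.2 []))) :=
    PySem.Dict.items_foldl_insert_fresh ((ciPairs d).map (fun q => (q.1.1, q.2.1)))
      (fun pr => pr)
      (fun pr => PySem.Set.inter ((PySem.Dict.mk d).getD pr.1 [])
        ((PySem.Dict.mk d).getD pr.2 []))
      PySem.Dict.empty (fun a _ => PySem.Dict.contains_empty _) hnd'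
  rw [hitems]
  simp only [List.nil_append, List.map_map]
  rfl


-- ===== VERDICT (by name: the statement is the Claim_ definition above) =====
theorem common_interests_spec : Claim_equal_common_interests := by
  intro d _hdom hpre
  obtain ⟨hnd, hv⟩ := hpre
  unfold Spec_common_interests
  rw [ciA_eq d hnd, ciB_eq d hnd hv]
  apply List.map_congr_left
  intro q hq
  rw [ciPairs_mem] at hq
  obtain ⟨h1, h2, -, -⟩ := hq
  have k1 : (PySem.Dict.mk d).getD q.1.1 [] = q.1.2 :=
    PySem.Dict.getD_of_mem_items (PySem.Dict.mk d) (k := q.1.1) (v := q.1.2) h1 hnd []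
  have k2 : (PySem.Dict.mk d).getD q.2.1 [] = q.2.2 :=
    PySem.Dict.getD_of_mem_items (PySem.Dict.mk d) (k := q.2.1) (v := q.2.2) h2 hnd []
  rw [k1, k2]
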